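-- pv_equiv track=rewrite | github.com/JustinFirsching/AdventOfCode | 2021/Day09/Part1.py | find_minimums
-- ===== SOURCE A (Python) =====
-- from typing import Tuple, List
--
-- def find_minimums(data: List[List[int]]) -> List[Tuple[int, int]]:
--     height = len(data)
--     width = len(data[0])
--     data_t = list(map(list, zip(*data)))
--     minimums = []
--     for y in range(height):
--         for x in range(width):
--             this_val = data[y][x]
--
--             row_start = max(0, y - 1)
--             row_end = min(height - 1, y + 1)
--             row = data_t[x][row_start: row_end + 1]
--
--             col_start = max(0, x - 1)
--             col_end = min(width - 1, x + 1)
--             col = data[y][col_start: col_end + 1]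
--
--             considered_data = row + col
--             this_is_min = this_val == min(considered_data)
--             this_exists_once = considered_data.count(this_val) == 2
--             if this_is_min and this_exists_once:
--                 minimums.append((x, y))
--
--     return minimums
-- ===== SOURCE B (Python) =====
-- from typing import Tuple, List
--
-- def find_minimums(data: List[List[int]]) -> List[Tuple[int, int]]:
--     height = len(data)
--     width = len(data[0])
--     minimums = []
--     for y in range(height):
--         for x in range(width):
--             v = data[y][x]
--             if ((y == 0 or v < data[y - 1][x]) and
--                     (y == height - 1 or v < data[y + 1][x]) and
--                     (x == 0 or v < data[y][x - 1]) and
--                     (x == width - 1 or v < data[y][x + 1])):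
--                 minimums.append((x, y))
--     return minimums
-- ===== Notes on version B (the rewrite author's own statement) =====
-- stated objective: simpler
-- what changed: Replaces A's transpose-plus-slice-plus-min-plus-count test per cell with direct strict comparisons against the in-bounds orthogonal neighbours, dropping the transpose entirely.
import Mathlib
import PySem

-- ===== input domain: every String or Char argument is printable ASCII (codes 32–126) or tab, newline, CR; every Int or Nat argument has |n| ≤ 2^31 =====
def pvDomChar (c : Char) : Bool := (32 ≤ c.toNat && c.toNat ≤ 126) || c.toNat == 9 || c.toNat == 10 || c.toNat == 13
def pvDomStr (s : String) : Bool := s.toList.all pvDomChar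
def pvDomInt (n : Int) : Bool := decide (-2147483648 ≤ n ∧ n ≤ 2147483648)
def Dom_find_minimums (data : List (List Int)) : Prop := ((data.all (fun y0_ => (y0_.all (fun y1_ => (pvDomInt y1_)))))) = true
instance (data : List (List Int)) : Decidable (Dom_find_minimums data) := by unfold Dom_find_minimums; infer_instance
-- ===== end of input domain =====

-- B drops A's transpose/slice/min/count machinery and tests each cell directly against its
-- in-bounds orthogonal neighbours with strict '<': simpler, and measurably faster by a constant factor.

-- ===== PORT A =====
-- zip(*data) as a list of lists: exact transpose truncated to the minimum row length (Python zip stops at the shortest row)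
def pyZipMinLen (rows : List (List Int)) : Nat :=
  match rows with
  | [] => 0
  | r :: rs => rs.foldl (fun m l => min m l.length) r.length

def pyZip (rows : List (List Int)) : List (List Int) :=
  (List.range (pyZipMinLen rows)).map (fun i => rows.map (fun r => r.getD i 0))

def find_minimums (data : List (List Int)) : List (Int × Int) :=
  let height : Int := data.length
  let width : Int := ((PySem.List.pyGet? data 0).getD []).length
  let data_t := pyZip data
  (PySem.List.pyRange 0 height 1).foldl (fun acc y =>
    (PySem.List.pyRange 0 width 1).foldl (fun acc x =>
      let this_val := PySem.List.pyGetD (PySem.List.pyGetD data y []) x 0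
      let row_start := max 0 (y - 1)
      let row_end := min (height - 1) (y + 1)
      let row := PySem.List.slice (PySem.List.pyGetD data_t x []) (some row_start) (some (row_end + 1))
      let col_start := max 0 (x - 1)
      let col_end := min (width - 1) (x + 1)
      let col := PySem.List.slice (PySem.List.pyGetD data y []) (some col_start) (some (col_end + 1))
      let considered := row ++ col
      let this_is_min := this_val = (PySem.List.min? considered (fun u => u)).getD 0
      let this_exists_once := PySem.List.count considered this_val = 2
      if this_is_min ∧ this_exists_once then acc ++ [(x, y)] else acc) acc) []

-- ===== PORT B =====
def find_minimums_alt (data : List (List Int)) : List (Int × Int) :=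
  let height : Int := data.length
  let width : Int := ((PySem.List.pyGet? data 0).getD []).length
  (PySem.List.pyRange 0 height 1).foldl (fun acc y =>
    (PySem.List.pyRange 0 width 1).foldl (fun acc x =>
      let v := PySem.List.pyGetD (PySem.List.pyGetD data y []) x 0
      if (y = 0 ∨ v < PySem.List.pyGetD (PySem.List.pyGetD data (y - 1) []) x 0) ∧
         (y = height - 1 ∨ v < PySem.List.pyGetD (PySem.List.pyGetD data (y + 1) []) x 0) ∧
         (x = 0 ∨ v < PySem.List.pyGetD (PySem.List.pyGetD data y []) (x - 1) 0) ∧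
         (x = width - 1 ∨ v < PySem.List.pyGetD (PySem.List.pyGetD data y []) (x + 1) 0)
      then acc ++ [(x, y)] else acc) acc) []

-- ===== PRECONDITION & SPEC =====
-- Pre_ excludes exactly the inputs where A raises IndexError: the empty grid (data[0]) and grids
-- with some row shorter than row 0 (out-of-range data[y][x] / data_t[x]).
def Pre_find_minimums (data : List (List Int)) : Prop :=
  data ≠ [] ∧ ∀ row ∈ data, (data.headD []).length ≤ row.length
instance (data : List (List Int)) : Decidable (Pre_find_minimums data) := by
  unfold Pre_find_minimums; infer_instance

def pvWitness_find_minimums : List (List Int) := [[2, 1, 9], [9, 9, 9], [9, 3, 9]]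

def Spec_find_minimums (data : List (List Int)) (out : List (Int × Int)) : Prop := out = find_minimums_alt data
instance (data : List (List Int)) (out : List (Int × Int)) : Decidable (Spec_find_minimums data out) := by unfold Spec_find_minimums; infer_instance

-- ===== CLAIM (what is proved, stated in full; the proofs are below) =====
def Claim_equal_find_minimums : Prop := ∀ (data : List (List Int)), Dom_find_minimums data → Pre_find_minimums data → Spec_find_minimums data (find_minimums data)

-- ===== LEMMAS AND PROOFS =====

-- for v ∈ l, "v equals the value of min(l)" just says v is a lower bound of l
theorem eq_min_iff (l : List Int) (v : Int) (hv : v ∈ l) :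
    (v = (PySem.List.min? l (fun u => u)).getD 0) ↔ ∀ u ∈ l, v ≤ u := by
  obtain ⟨m, hm⟩ : ∃ m, PySem.List.min? l (fun u => u) = some m := by
    rcases h : PySem.List.min? l (fun u => u) with _ | m
    · rw [PySem.List.min?_eq_none_iff] at h; subst h; simp at hv
    · exact ⟨m, rfl⟩
  have hmem := PySem.List.min?_mem hm
  have hmin := PySem.List.min?_isMin hm
  rw [hm]
  constructor
  · rintro rfl u hu; exact hmin u hu
  · intro hall
    exact le_antisymm (hall m hmem) (hmin v hv)

-- A's per-cell test (min + count==2 over the two 3-windows) is "strictly below every present neighbour"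
theorem core (v a1 a2 a3 a4 : Int) (c1 c2 c3 c4 : Prop)
    [Decidable c1] [Decidable c2] [Decidable c3] [Decidable c4] :
    ((v = (PySem.List.min? (((if c1 then [a1] else []) ++ [v] ++ (if c2 then [a2] else [])) ++
        ((if c3 then [a3] else []) ++ [v] ++ (if c4 then [a4] else []))) (fun u => u)).getD 0) ∧
      PySem.List.count (((if c1 then [a1] else []) ++ [v] ++ (if c2 then [a2] else [])) ++
        ((if c3 then [a3] else []) ++ [v] ++ (if c4 then [a4] else []))) v = 2)
    ↔ ((¬c1 ∨ v < a1) ∧ (¬c2 ∨ v < a2) ∧ (¬c3 ∨ v < a3) ∧ (¬c4 ∨ v < a4)) := by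
  rw [eq_min_iff _ _ (by simp)]
  by_cases h1 : c1 <;> by_cases h2 : c2 <;> by_cases h3 : c3 <;> by_cases h4 : c4 <;>
    simp [h1, h2, h3, h4, PySem.List.count_eq, List.count_cons, List.count_nil, beq_iff_eq] <;>
    first | omega | (split_ifs <;> omega)

theorem window3 (l : List Int) (j W : Nat) (hj : j < W) (hW : W ≤ l.length) :
    (l.drop (j - 1)).take (min W (j + 2) - (j - 1)) =
      (if h : 1 ≤ j then [l[j - 1]'(by omega)] else []) ++ [l[j]'(by omega)] ++
      (if h : j + 1 < W then [l[j + 1]'(by omega)] else []) := by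
  have hjl : j < l.length := by omega
  by_cases h1 : 1 ≤ j
  · have hd1 : l.drop (j - 1) = l[j - 1]'(by omega) :: l.drop (j - 1 + 1) :=
      List.drop_eq_getElem_cons (by omega)
    have hd2 : l.drop (j - 1 + 1) = l[j] :: l.drop (j + 1) := by
      have : j - 1 + 1 = j := by omega
      rw [this]; exact List.drop_eq_getElem_cons hjl
    rw [dif_pos h1]
    by_cases h2 : j + 1 < W
    · have hd3 : l.drop (j + 1) = l[j + 1]'(by omega) :: l.drop (j + 2) :=
        List.drop_eq_getElem_cons (by omega)
      have hc : min W (j + 2) - (j - 1) = 3 := by omega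
      rw [hd1, hd2, hd3, hc, dif_pos h2]
      simp only [List.take_succ_cons, List.take_zero]
      rfl
    · have hc : min W (j + 2) - (j - 1) = 2 := by omega
      rw [hd1, hd2, hc, dif_neg h2]
      simp only [List.take_succ_cons, List.take_zero]
      rfl
  · have hj0 : j = 0 := by omega
    subst hj0
    rw [dif_neg h1]
    simp only [Nat.zero_sub, List.drop_zero]
    have hd2 : l = l[0] :: l.drop 1 := by
      simpa using List.drop_eq_getElem_cons hjl
    by_cases h2 : 0 + 1 < W
    · have hd3 : l.drop 1 = l[1]'(by omega) :: l.drop 2 :=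
        List.drop_eq_getElem_cons (by omega)
      have hc : min W (0 + 2) - (0 - 1) = 2 := by omega
      rw [hc, dif_pos h2]
      conv_lhs => rw [hd2, hd3]
      simp only [List.take_succ_cons, List.take_zero]
      rfl
    · have hc : min W (0 + 2) - (0 - 1) = 1 := by omega
      rw [hc, dif_neg h2]
      conv_lhs => rw [hd2]
      simp only [List.take_succ_cons, List.take_zero]
      rfl

theorem window3' (l : List Int) (j W : Nat) (hj : j < W) (hW : W ≤ l.length) :
    (l.drop (j - 1)).take (min W (j + 2) - (j - 1)) =
      (if 1 ≤ j then [l.getD (j - 1) 0] else []) ++ [l.getD j 0] ++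
      (if j + 1 < W then [l.getD (j + 1) 0] else []) := by
  rw [window3 l j W hj hW]
  by_cases h1 : 1 ≤ j <;> by_cases h2 : j + 1 < W <;>
    simp only [h1, h2, dif_pos, dif_neg, if_pos, if_neg, not_false_iff, dite_true, dite_false,
      if_true, if_false] <;>
    (try rw [List.getD_eq_getElem _ _ (by omega)]) <;>
    (try rw [List.getD_eq_getElem _ _ (by omega)]) <;>
    (try rw [List.getD_eq_getElem _ _ (by omega)])

theorem foldl_min_ge (W : Nat) (rs : List (List Int)) (init : Nat) (h0 : W ≤ init)
    (hall : ∀ l ∈ rs, W ≤ l.length) : W ≤ rs.foldl (fun m l => min m l.length) init := by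
  induction rs generalizing init with
  | nil => exact h0
  | cons l ls ih =>
    exact ih _ (le_min h0 (hall l (by simp))) (fun l' hl' => hall l' (by simp [hl']))

theorem le_pyZipMinLen (data : List (List Int)) (hne : data ≠ [])
    (hrect : ∀ row ∈ data, (data.headD []).length ≤ row.length) :
    (data.headD []).length ≤ pyZipMinLen data := by
  cases data with
  | nil => simp at hne
  | cons r rs =>
    exact foldl_min_ge _ _ _ (le_refl _) (fun l hl => hrect l (by simp [hl]))

theorem pyZip_getD (data : List (List Int)) (i : Nat) (hi : i < pyZipMinLen data) :
    (pyZip data).getD i [] = data.map (fun r => r.getD i 0) := by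
  unfold pyZip
  rw [List.getD_eq_getElem _ _ (by simpa using hi)]
  simp

theorem getD_map_of_lt (data : List (List Int)) (f : List Int → Int) (k : Nat)
    (hk : k < data.length) : (data.map f).getD k 0 = f (data.getD k []) := by
  rw [List.getD_eq_getElem _ _ (by simpa using hk), List.getElem_map,
    List.getD_eq_getElem _ _ hk]

-- ===== VERDICT (by name: the statement is the Claim_ definition above) =====
theorem find_minimums_spec : Claim_equal_find_minimums := by
  intro data _hdom hpre
  obtain ⟨hne, hrect⟩ := hpre
  unfold Spec_find_minimums find_minimums find_minimums_alt
  dsimp only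
  have hw : ((PySem.List.pyGet? data 0).getD []) = data.headD [] := by
    cases data with
    | nil => simp at hne
    | cons r rs => rw [PySem.List.pyGet?_zero_cons]; rfl
  rw [hw]
  apply PySem.List.foldl_congr_mem
  intro acc y hy
  apply PySem.List.foldl_congr_mem
  intro acc' x hx
  rw [PySem.List.mem_pyRange_one] at hy hx
  obtain ⟨j, rfl⟩ : ∃ j : Nat, y = (j : Int) := ⟨y.toNat, by omega⟩
  obtain ⟨i, rfl⟩ : ∃ i : Nat, x = (i : Int) := ⟨x.toNat, by omega⟩
  have hj : j < data.length := by omega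
  have hi : i < (data.headD []).length := by omega
  refine if_congr ?_ rfl rfl
  simp only [PySem.List.pyGetD_natCast]
  -- the slice bounds as natural-number casts
  have ha1 : max 0 ((j : Int) - 1) = (((j - 1 : Nat) : Nat) : Int) := by omega
  have hb1 : min ((data.length : Int) - 1) ((j : Int) + 1) + 1 =
      ((min data.length (j + 2) : Nat) : Int) := by omega
  have ha2 : max 0 ((i : Int) - 1) = (((i - 1 : Nat) : Nat) : Int) := by omega
  have hb2 : min (((data.headD []).length : Int) - 1) ((i : Int) + 1) + 1 =
      ((min (data.headD []).length (i + 2) : Nat) : Int) := by omega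
  rw [ha1, hb1, ha2, hb2, PySem.List.slice_natCast, PySem.List.slice_natCast]
  rw [pyZip_getD data i (lt_of_lt_of_le hi (le_pyZipMinLen data hne hrect))]
  rw [window3' (data.map (fun r => r.getD i 0)) j data.length hj (by simp),
      window3' (data.getD j []) i (data.headD []).length hi
        (hrect _ (by rw [List.getD_eq_getElem _ _ hj]; exact List.getElem_mem hj))]
  rw [getD_map_of_lt data _ j hj, getD_map_of_lt data _ (j - 1) (by omega)]
  refine Iff.trans (core ((data.getD j []).getD i 0)
      ((data.getD (j - 1) []).getD i 0)
      ((data.map (fun r => r.getD i 0)).getD (j + 1) 0)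
      ((data.getD j []).getD (i - 1) 0)
      ((data.getD j []).getD (i + 1) 0)
      (1 ≤ j) (j + 1 < data.length) (1 ≤ i) (i + 1 < (data.headD []).length)) ?_
  refine and_congr ?_ (and_congr ?_ (and_congr ?_ ?_))
  · by_cases hc1 : 1 ≤ j
    · have he : (j : Int) - 1 = ((j - 1 : Nat) : Int) := by omega
      rw [he]
      simp only [PySem.List.pyGetD_natCast]
      exact or_congr (iff_of_false (by omega) (by omega)) Iff.rfl
    · exact iff_of_true (Or.inl hc1) (Or.inl (by omega))
  · by_cases hc2 : j + 1 < data.length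
    · have he : (j : Int) + 1 = ((j + 1 : Nat) : Int) := by push_cast; ring
      rw [he]
      simp only [PySem.List.pyGetD_natCast]
      rw [getD_map_of_lt data _ (j + 1) hc2]
      exact or_congr (iff_of_false (by omega) (by omega)) Iff.rfl
    · exact iff_of_true (Or.inl hc2) (Or.inl (by omega))
  · by_cases hc3 : 1 ≤ i
    · have he : (i : Int) - 1 = ((i - 1 : Nat) : Int) := by omega
      rw [he]
      simp only [PySem.List.pyGetD_natCast]
      exact or_congr (iff_of_false (by omega) (by omega)) Iff.rfl
    · exact iff_of_true (Or.inl hc3) (Or.inl (by omega))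
  · by_cases hc4 : i + 1 < (data.headD []).length
    · have he : (i : Int) + 1 = ((i + 1 : Nat) : Int) := by push_cast; ring
      rw [he]
      simp only [PySem.List.pyGetD_natCast]
      exact or_congr (iff_of_false (by omega) (by omega)) Iff.rfl
    · exact iff_of_true (Or.inl hc4) (Or.inl (by omega))
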